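-- pv_equiv track=rewrite | github.com/tlettsilveiro1/Estructura-de-Datos | practica-funciones-tlettsilveiro1-main/Ej8.py | comprimir_y_revertir_hexa
-- ===== SOURCE A (Python) =====
-- def comprimir_y_revertir_hexa(cadena: str):
--     if not cadena:  # caso cadena vacía (quiere decir que la cadena es FALSE)
--         return ""
--
--     bloques = []
--     contador = 1
--
--     for i in range(1, len(cadena)):
--         if cadena[i] == cadena[i - 1]:
--             contador += 1
--         else:
--             bloques.append(format(contador, "x") + cadena[i - 1])
--             contador = 1
--     bloques.append(format(contador, "x") + cadena[-1]) # último grupo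
--
--     # ahora invertimos el orden de los BLOQUES
--     bloques.reverse()
--
--     # unimos en una sola cadena
--     return "".join(bloques)
-- ===== SOURCE B (Python) =====
-- def comprimir_y_revertir_hexa(cadena: str):
--     # reverse first, then split off whole runs: blocks come out already in reversed order
--     rev = cadena[::-1]
--     out = []
--     n = len(rev)
--     i = 0
--     while i < n:
--         j = i + 1
--         while j < n and rev[j] == rev[i]:
--             j += 1
--         out.append(format(j - i, "x") + rev[i])
--         i = j
--     return "".join(out)
-- ===== Notes on version B (the rewrite author's own statement) =====
-- stated objective: alternative
-- what changed: B reverses the string first and then splits off whole runs with a two-pointer scan, so A's adjacent-comparison counter state, its post-loop final block and the final reversal of the block list all disappear.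
import Mathlib
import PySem

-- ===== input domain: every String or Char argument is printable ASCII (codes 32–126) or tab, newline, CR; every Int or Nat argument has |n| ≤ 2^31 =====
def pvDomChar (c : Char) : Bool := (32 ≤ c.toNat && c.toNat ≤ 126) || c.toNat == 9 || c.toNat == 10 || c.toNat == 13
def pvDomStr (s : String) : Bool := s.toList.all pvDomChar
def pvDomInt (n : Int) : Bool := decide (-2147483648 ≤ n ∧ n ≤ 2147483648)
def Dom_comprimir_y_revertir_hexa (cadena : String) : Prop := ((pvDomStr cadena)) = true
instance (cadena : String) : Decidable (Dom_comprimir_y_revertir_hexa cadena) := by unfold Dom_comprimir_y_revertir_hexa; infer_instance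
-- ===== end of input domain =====

-- B reverses the string first and then splits off whole runs, so A's adjacent-comparison
-- counter, its post-loop block and the final list reversal all disappear (alternative, same cost).

-- shared helper: Python's format(n, "x") for n ≥ 0 (both Pythons call this builtin)
def pvHexDigit (n : Nat) : Char := if n < 10 then Char.ofNat (48 + n) else Char.ofNat (87 + n)

def pvHexAux (n : Nat) : List Char :=
  if _h : n = 0 then [] else pvHexAux (n / 16) ++ [pvHexDigit (n % 16)]
decreasing_by exact Nat.div_lt_self (Nat.pos_of_ne_zero _h) (by omega)

def pvHex (n : Nat) : List Char := if n = 0 then ['0'] else pvHexAux n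

-- ===== PORT A =====
def comprimir_y_revertir_hexa (cadena : String) : String :=
  let cs := cadena.toList
  if cs = [] then "" else
    let st : List (List Char) × Nat :=
      (PySem.List.pyRange 1 (PySem.List.len cs) 1).foldl
        (fun (st : List (List Char) × Nat) i =>
          if PySem.List.pyGetD cs i ' ' = PySem.List.pyGetD cs (i - 1) ' ' then
            (st.1, st.2 + 1)
          else
            (st.1 ++ [pvHex st.2 ++ [PySem.List.pyGetD cs (i - 1) ' ']], 1))
        ([], 1)
    let bloques := st.1 ++ [pvHex st.2 ++ [(PySem.List.pyGet? cs (-1)).getD ' ']]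
    let bloques := bloques.reverse
    String.mk bloques.flatten

-- ===== PORT B =====
-- the while loop of Source B: split off the first run (the inner `while` advancing j is the
-- takeWhile scan), append its block, continue after the run
def pvAltGo (resto : List Char) (out : List (List Char)) : List (List Char) :=
  match resto with
  | [] => out
  | c :: t =>
    let k := (t.takeWhile (· == c)).length
    pvAltGo (t.drop k) (out ++ [pvHex (k + 1) ++ [c]])
termination_by resto.length
decreasing_by simp

def comprimir_y_revertir_hexa_alt (cadena : String) : String :=
  -- cadena[::-1] is exactly List.reverse of the character list
  String.mk (pvAltGo cadena.toList.reverse []).flatten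

-- ===== PRECONDITION & SPEC =====
def Spec_comprimir_y_revertir_hexa (cadena : String) (out : String) : Prop := out = comprimir_y_revertir_hexa_alt cadena
instance (cadena : String) (out : String) : Decidable (Spec_comprimir_y_revertir_hexa cadena out) := by unfold Spec_comprimir_y_revertir_hexa; infer_instance

-- ===== CLAIM (what is proved, stated in full; the proofs are below) =====
def Claim_equal_comprimir_y_revertir_hexa : Prop := ∀ (cadena : String), Dom_comprimir_y_revertir_hexa cadena → Spec_comprimir_y_revertir_hexa cadena (comprimir_y_revertir_hexa cadena)

-- ===== LEMMAS AND PROOFS =====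

-- adjacent-pair fold: the shape of A's index loop once the indices are gone
def adjFold {σ : Type} (f : σ → Char → Char → σ) : σ → Char → List Char → σ
  | st, _, [] => st
  | st, p, c :: t => adjFold f (f st p c) c t

-- A's index loop over range(1, len cs) is the adjacent-pair fold
theorem idx_fold {σ : Type} (f : σ → Char → Char → σ) (d : Char) :
    ∀ (rest : List Char) (pre : List Char) (c : Char) (init : σ),
      (PySem.List.pyRange ((pre.length : Int) + 1) (PySem.List.len (pre ++ c :: rest)) 1).foldl
        (fun st i => f st (PySem.List.pyGetD (pre ++ c :: rest) (i - 1) d)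
                          (PySem.List.pyGetD (pre ++ c :: rest) i d)) init
      = adjFold f init c rest := by
  intro rest
  induction rest with
  | nil =>
    intro pre c init
    rw [PySem.List.pyRange_one_eq_nil (by simp)]
    rfl
  | cons e t ih =>
    intro pre c init
    rw [PySem.List.pyRange_one_cons (by simp)]
    rw [List.foldl_cons]
    have h1 : PySem.List.pyGetD (pre ++ c :: e :: t) ((pre.length : Int) + 1 - 1) d = c := by
      simp [PySem.List.pyGetD_natCast]
    have h2 : PySem.List.pyGetD (pre ++ c :: e :: t) ((pre.length : Int) + 1) d = e := by
      have : ((pre.length : Int) + 1) = (((pre.length + 1 : Nat)) : Int) := by push_cast; ring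
      rw [this, PySem.List.pyGetD_natCast]
      simp
    rw [h1, h2]
    have := ih (pre ++ [c]) e (f init c e)
    simpa using this

-- the specific loop body of A
def bodyA (st : List (List Char) × Nat) (p cur : Char) : List (List Char) × Nat :=
  if cur = p then (st.1, st.2 + 1) else (st.1 ++ [pvHex st.2 ++ [p]], 1)

-- A's loop result + the post-loop append, as one recursion
def finA (bl : List (List Char)) (m : Nat) (c : Char) : List Char → List (List Char)
  | [] => bl ++ [pvHex m ++ [c]]
  | e :: t => if e = c then finA bl (m + 1) e t else finA (bl ++ [pvHex m ++ [c]]) 1 e t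

theorem adjFold_finA : ∀ (rest : List Char) (bl : List (List Char)) (m : Nat) (c : Char),
    (adjFold bodyA (bl, m) c rest).1 ++
      [pvHex (adjFold bodyA (bl, m) c rest).2 ++ [(c :: rest).getLast (by simp)]]
    = finA bl m c rest := by
  intro rest
  induction rest with
  | nil => intro bl m c; simp [adjFold, finA]
  | cons e t ih =>
    intro bl m c
    rw [show (c :: e :: t).getLast (by simp) = (e :: t).getLast (by simp) from
      List.getLast_cons (by simp)]
    by_cases h : e = c
    · subst h
      rw [show adjFold bodyA (bl, m) e (e :: t) = adjFold bodyA (bl, m + 1) e t from by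
        show adjFold bodyA (bodyA (bl, m) e e) e t = _
        rw [show bodyA (bl, m) e e = (bl, m + 1) from by simp [bodyA]]]
      rw [show finA bl m e (e :: t) = finA bl (m + 1) e t from by simp [finA]]
      exact ih bl (m + 1) e
    · rw [show adjFold bodyA (bl, m) c (e :: t)
            = adjFold bodyA (bl ++ [pvHex m ++ [c]], 1) e t from by
        show adjFold bodyA (bodyA (bl, m) c e) e t = _
        rw [show bodyA (bl, m) c e = (bl ++ [pvHex m ++ [c]], 1) from by simp [bodyA, h]]]
      rw [show finA bl m c (e :: t) = finA (bl ++ [pvHex m ++ [c]]) 1 e t from by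
        simp [finA, h]]
      exact ih (bl ++ [pvHex m ++ [c]]) 1 e

theorem finA_acc : ∀ (rest : List Char) (bl : List (List Char)) (m : Nat) (c : Char),
    finA bl m c rest = bl ++ finA [] m c rest := by
  intro rest
  induction rest with
  | nil => intro bl m c; simp [finA]
  | cons e t ih =>
    intro bl m c
    by_cases h : e = c
    · subst h
      simp only [finA, if_pos rfl]
      exact ih bl (m + 1) e
    · simp only [finA, if_neg h]
      rw [ih (bl ++ [pvHex m ++ [c]]) 1 e, ih ([] ++ [pvHex m ++ [c]]) 1 e]
      simp

-- the blocks of a string, forward order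
def blocksOf : List Char → List (List Char)
  | [] => []
  | c :: t => finA [] 1 c t

theorem finA_first_run : ∀ (rest : List Char) (m : Nat) (c : Char),
    finA [] m c rest
      = (pvHex (m + (rest.takeWhile (· == c)).length) ++ [c])
          :: blocksOf (rest.drop (rest.takeWhile (· == c)).length) := by
  intro rest
  induction rest with
  | nil => intro m c; simp [finA, blocksOf]
  | cons e t ih =>
    intro m c
    by_cases h : e = c
    · subst h
      simp only [finA, if_pos rfl, List.takeWhile_cons, beq_self_eq_true, if_true,
        List.length_cons, List.drop_succ_cons]
      rw [ih (m + 1) e]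
      rw [show m + 1 + (t.takeWhile (· == e)).length
            = m + ((t.takeWhile (· == e)).length + 1) from by omega]
    · have hb : (e == c) = false := by simp [h]
      simp only [finA, if_neg h, List.takeWhile_cons, hb, List.length_nil,
        List.drop_zero, Bool.false_eq_true, if_false]
      rw [finA_acc]
      simp [blocksOf]

-- B's run-splitting loop appends exactly the blocks of its input
theorem altGo_blocks : ∀ (cs : List Char) (out : List (List Char)),
    pvAltGo cs out = out ++ blocksOf cs := by
  intro cs out
  induction cs, out using pvAltGo.induct with
  | case1 out => simp [pvAltGo, blocksOf]
  | case2 out c t k ih =>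
    rw [pvAltGo]
    rw [ih]
    rw [show blocksOf (c :: t) = finA [] 1 c t from rfl, finA_first_run]
    rw [Nat.add_comm 1 ((List.takeWhile (fun x => x == c) t).length)]
    simp
    exact ⟨rfl, rfl⟩

theorem finA_replicate : ∀ (q m : Nat) (c : Char),
    finA [] m c (List.replicate q c) = [pvHex (m + q) ++ [c]] := by
  intro q
  induction q with
  | zero => intro m c; simp [finA]
  | succ q ih =>
    intro m c
    rw [List.replicate_succ]
    rw [show finA [] m c (c :: List.replicate q c) = finA [] (m + 1) c (List.replicate q c)
      from by simp [finA]]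
    rw [ih (m + 1) c]
    rw [show m + 1 + q = m + (q + 1) from by omega]

theorem finA_append_split : ∀ (t : List Char) (m : Nat) (c y : Char) (ys : List Char),
    (c :: t).getLast (by simp) ≠ y →
    finA [] m c (t ++ y :: ys) = finA [] m c t ++ finA [] 1 y ys := by
  intro t
  induction t with
  | nil =>
    intro m c y ys hne
    simp only [List.getLast_singleton] at hne
    have hyc : ¬ (y = c) := fun h => hne h.symm
    simp only [List.nil_append, finA, if_neg hyc]
    rw [finA_acc]
  | cons e t' ih =>
    intro m c y ys hne
    rw [List.getLast_cons (by simp)] at hne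
    by_cases h : e = c
    · subst h
      simp only [List.cons_append, finA, if_pos rfl]
      exact ih (m + 1) e y ys hne
    · simp only [List.cons_append, finA, if_neg h]
      rw [finA_acc, ih 1 e y ys hne, finA_acc t' ([] ++ [pvHex m ++ [c]])]
      simp

theorem blocksOf_append : ∀ (xs : List Char) (y : Char) (ys : List Char) (hx : xs ≠ []),
    xs.getLast hx ≠ y →
    blocksOf (xs ++ y :: ys) = blocksOf xs ++ blocksOf (y :: ys) := by
  intro xs y ys hx hne
  match xs with
  | c :: t =>
    show blocksOf (c :: (t ++ y :: ys)) = _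
    rw [show blocksOf (c :: (t ++ y :: ys)) = finA [] 1 c (t ++ y :: ys) from rfl]
    rw [finA_append_split t 1 c y ys hne]
    rfl

-- the blocks of the reversed string are the reversed blocks
theorem blocksOf_reverse_aux : ∀ (n : Nat) (cs : List Char), cs.length ≤ n →
    blocksOf cs.reverse = (blocksOf cs).reverse := by
  intro n
  induction n with
  | zero =>
    intro cs h
    rw [List.eq_nil_of_length_eq_zero (Nat.le_zero.mp h)]
    rfl
  | succ n ih =>
    intro cs hlen
    match cs with
    | [] => rfl
    | c :: rest =>
      have hrep : rest.takeWhile (· == c)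
          = List.replicate (rest.takeWhile (· == c)).length c := by
        apply List.eq_replicate_of_mem
        intro b hb
        have := List.mem_takeWhile_imp hb
        simpa using this
      have hsplit : rest
          = List.replicate (rest.takeWhile (· == c)).length c ++ rest.dropWhile (· == c) := by
        have h0 := List.takeWhile_append_dropWhile (p := (· == c)) (l := rest)
        rw [hrep] at h0
        exact h0.symm
      have hdrop : rest.drop (rest.takeWhile (· == c)).length = rest.dropWhile (· == c) := by
        have h0 : List.drop (rest.takeWhile (· == c)).length
              (rest.takeWhile (· == c) ++ rest.dropWhile (· == c))
            = rest.dropWhile (· == c) := List.drop_left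
        rwa [List.takeWhile_append_dropWhile] at h0
      have hrev : (c :: rest).reverse
          = (rest.dropWhile (· == c)).reverse
              ++ List.replicate ((rest.takeWhile (· == c)).length + 1) c := by
        rw [show (c :: rest).reverse = rest.reverse ++ [c] from by simp]
        conv_lhs => rw [hsplit]
        rw [List.reverse_append, List.reverse_replicate, List.append_assoc,
          ← List.replicate_succ']
      have hfirst : blocksOf (c :: rest)
          = (pvHex (1 + (rest.takeWhile (· == c)).length) ++ [c])
              :: blocksOf (rest.dropWhile (· == c)) := by
        rw [show blocksOf (c :: rest) = finA [] 1 c rest from rfl, finA_first_run, hdrop]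
      rw [hrev, hfirst]
      match htc : rest.dropWhile (· == c) with
      | [] =>
        rw [show List.replicate ((rest.takeWhile (· == c)).length + 1) c
              = c :: List.replicate (rest.takeWhile (· == c)).length c from
            List.replicate_succ]
        simp only [List.reverse_nil, List.nil_append]
        rw [show blocksOf (c :: List.replicate (rest.takeWhile (· == c)).length c)
              = finA [] 1 c (List.replicate (rest.takeWhile (· == c)).length c) from rfl,
          finA_replicate]
        simp [blocksOf]
      | d :: t' =>
        have hw : rest.dropWhile (· == c) ≠ [] := by rw [htc]; simp
        have hd : d ≠ c := by
          have h1 := List.head_dropWhile_not (· == c) hw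
          simp only [htc, List.head_cons] at h1
          simpa using h1
        have htlen : (d :: t').length ≤ n := by
          have h1 : (rest.dropWhile (· == c)).length ≤ rest.length :=
            List.length_dropWhile_le _ _
          rw [htc] at h1
          simp only [List.length_cons] at h1 hlen ⊢
          omega
        rw [show List.replicate ((rest.takeWhile (· == c)).length + 1) c
              = c :: List.replicate (rest.takeWhile (· == c)).length c from
            List.replicate_succ]
        rw [blocksOf_append ((d :: t').reverse) c
            (List.replicate (rest.takeWhile (· == c)).length c) (by simp)
            (by rw [List.getLast_reverse]; simpa using hd)]
        rw [ih (d :: t') htlen]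
        rw [show blocksOf (c :: List.replicate (rest.takeWhile (· == c)).length c)
              = finA [] 1 c (List.replicate (rest.takeWhile (· == c)).length c) from rfl,
          finA_replicate]
        rw [Nat.add_comm 1 ((rest.takeWhile (· == c)).length)]
        simp

theorem blocksOf_reverse (cs : List Char) : blocksOf cs.reverse = (blocksOf cs).reverse :=
  blocksOf_reverse_aux cs.length cs le_rfl

theorem comprimir_y_revertir_hexa_spec : Claim_equal_comprimir_y_revertir_hexa := by
  intro cadena _
  unfold Spec_comprimir_y_revertir_hexa comprimir_y_revertir_hexa comprimir_y_revertir_hexa_alt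
  cases hcs : cadena.toList with
  | nil =>
    simp [pvAltGo]
    rfl
  | cons c t =>
    have hidx := idx_fold bodyA ' ' t [] c (([], 1) : List (List Char) × Nat)
    simp only [List.nil_append, List.length_nil, Nat.cast_zero, zero_add] at hidx
    rw [if_neg (by simp : ¬ (c :: t : List Char) = [])]
    rw [show (fun (st : List (List Char) × Nat) i =>
          if PySem.List.pyGetD (c :: t) i ' ' = PySem.List.pyGetD (c :: t) (i - 1) ' ' then
            (st.1, st.2 + 1)
          else (st.1 ++ [pvHex st.2 ++ [PySem.List.pyGetD (c :: t) (i - 1) ' ']], 1))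
        = (fun (st : List (List Char) × Nat) i =>
            bodyA st (PySem.List.pyGetD (c :: t) (i - 1) ' ')
              (PySem.List.pyGetD (c :: t) i ' ')) from rfl]
    rw [hidx]
    rw [PySem.List.pyGet?_neg_one,
      List.getLast?_eq_getLast (l := c :: t) (by simp), Option.getD_some]
    show String.mk (((adjFold bodyA ([], 1) c t).1 ++
        [pvHex (adjFold bodyA ([], 1) c t).2 ++ [(c :: t).getLast (by simp)]]).reverse.flatten)
      = String.mk (pvAltGo (c :: t).reverse []).flatten
    rw [adjFold_finA t [] 1 c]
    rw [altGo_blocks]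
    rw [blocksOf_reverse]
    rfl
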